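-- pv_equiv track=rewrite | github.com/angellicacardozo/linear-algebra-methods | P15CSRF.py | getCompressedSparseRowFormatFromMatrix
-- ===== SOURCE A (Python) =====
-- def getCompressedSparseRowFormatFromMatrix(A):
--
-- 	nrows = len(A)
-- 	ncols = len(A[0])
--
-- 	firstocc = -1
--
-- 	AV = [] #non zero values
-- 	AC = [] #non zero columns
-- 	AR = [] #pointers to the beginning of each row
--
-- 	for i in range(nrows):
-- 		for j in range(ncols):
--
-- 			if(A[i][j]!=0 and firstocc==-1):
-- 				firstocc = len(AV) # Register the non zero first occ
--
-- 			if(A[i][j] != 0):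
-- 				AV.append(A[i][j])
-- 				AC.append(j)
--
-- 		if not firstocc==-1:
-- 			AR.append(firstocc)
--
-- 		firstocc = -1
--
-- 	return (AV, AC, AR)
-- ===== SOURCE B (Python) =====
-- def getCompressedSparseRowFormatFromMatrix(A):
--     nrows = len(A)
--     ncols = len(A[0])
--     entries = [(i, j, A[i][j]) for i in range(nrows) for j in range(ncols) if A[i][j] != 0]
--     AV = [v for _, _, v in entries]
--     AC = [j for _, j, _ in entries]
--     AR = []
--     prev = -1
--     for pos, (i, _, _) in enumerate(entries):
--         if i != prev:
--             AR.append(pos)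
--             prev = i
--     return (AV, AC, AR)
-- ===== Notes on version B (the rewrite author's own statement) =====
-- stated objective: alternative
-- what changed: B first materialises the nonzero entries as one flat list of (row, col, value) triples, then derives AV and AC by projection and AR by a single boundary scan over that list that appends the position whenever a new row index first appears, instead of A's per-row firstocc sentinel threaded through nested loops.
import Mathlib
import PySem

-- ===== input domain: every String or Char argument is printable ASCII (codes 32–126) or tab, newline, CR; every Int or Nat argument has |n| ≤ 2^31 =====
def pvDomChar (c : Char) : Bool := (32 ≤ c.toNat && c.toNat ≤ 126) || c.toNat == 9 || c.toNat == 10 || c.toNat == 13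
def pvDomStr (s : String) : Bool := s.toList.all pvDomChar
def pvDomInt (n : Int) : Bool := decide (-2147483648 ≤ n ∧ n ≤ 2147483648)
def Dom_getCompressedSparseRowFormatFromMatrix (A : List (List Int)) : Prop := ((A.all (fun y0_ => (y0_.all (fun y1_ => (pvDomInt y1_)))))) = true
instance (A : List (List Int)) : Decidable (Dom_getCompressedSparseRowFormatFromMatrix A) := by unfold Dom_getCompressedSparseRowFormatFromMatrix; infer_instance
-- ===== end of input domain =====

-- B builds the flat list of nonzero (row, col, value) triples first, then projects AV/AC and
-- computes AR by one boundary scan over that list; same values as A, no speed claim.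

-- ===== PORT A =====
-- A[i][j]; both indices are in range whenever this is evaluated under Pre_
def pvAij (A : List (List Int)) (i j : Int) : Int :=
  PySem.List.pyGetD (PySem.List.pyGetD A i []) j 0

-- the body of A's inner `for j in range(ncols)` loop; state = (AV, AC, AR, firstocc)
def pvStepInner (A : List (List Int)) (i : Int)
    (st : List Int × List Int × List Int × Int) (j : Int) :
    List Int × List Int × List Int × Int :=
  let aij := pvAij A i j
  let f := if aij ≠ 0 ∧ st.2.2.2 = -1 then (st.1.length : Int) else st.2.2.2
  if aij ≠ 0 then (st.1 ++ [aij], st.2.1 ++ [j], st.2.2.1, f) else (st.1, st.2.1, st.2.2.1, f)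

def pvInnerA (A : List (List Int)) (i : Int) (ncols : Nat)
    (st : List Int × List Int × List Int × Int) : List Int × List Int × List Int × Int :=
  (PySem.List.pyRange 0 (ncols : Int) 1).foldl (pvStepInner A i) st

-- the body of A's outer `for i in range(nrows)` loop
def pvStepOuter (A : List (List Int)) (ncols : Nat)
    (st : List Int × List Int × List Int × Int) (i : Int) :
    List Int × List Int × List Int × Int :=
  let st2 := pvInnerA A i ncols st
  if ¬ st2.2.2.2 = -1 then (st2.1, st2.2.1, st2.2.2.1 ++ [st2.2.2.2], -1)
  else (st2.1, st2.2.1, st2.2.2.1, -1)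

def getCompressedSparseRowFormatFromMatrix (A : List (List Int)) :
    List Int × List Int × List Int :=
  let nrows := A.length
  let ncols := (PySem.List.pyGetD A 0 []).length  -- len(A[0]); A ≠ [] under Pre_
  let res := (PySem.List.pyRange 0 (nrows : Int) 1).foldl (pvStepOuter A ncols) ([], [], [], -1)
  (res.1, res.2.1, res.2.2.1)

-- ===== PORT B =====
-- the nonzero triples (i, j, A[i][j]) contributed by row i of B's comprehension
def pvRowEntries (A : List (List Int)) (ncols : Nat) (i : Int) : List (Int × Int × Int) :=
  (PySem.List.pyRange 0 (ncols : Int) 1).filterMap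
    (fun j => if pvAij A i j ≠ 0 then some (i, j, pvAij A i j) else none)

def pvEntries (A : List (List Int)) (nrows ncols : Nat) : List (Int × Int × Int) :=
  (PySem.List.pyRange 0 (nrows : Int) 1).flatMap (pvRowEntries A ncols)

-- the body of B's boundary scan; state = (AR, prev, pos)
def pvStepB (st : List Int × Int × Int) (e : Int × Int × Int) : List Int × Int × Int :=
  if e.1 ≠ st.2.1 then (st.1 ++ [st.2.2], e.1, st.2.2 + 1) else (st.1, st.2.1, st.2.2 + 1)

def getCompressedSparseRowFormatFromMatrix_alt (A : List (List Int)) :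
    List Int × List Int × List Int :=
  let entries := pvEntries A A.length (PySem.List.pyGetD A 0 []).length
  let AV := entries.map (fun e => e.2.2)
  let AC := entries.map (fun e => e.2.1)
  let AR := (entries.foldl pvStepB ([], -1, 0)).1
  (AV, AC, AR)

-- ===== PRECONDITION & SPEC =====
-- Pre_ excludes exactly the inputs where the Python raises IndexError: the empty matrix
-- (len(A[0])) and ragged matrices with some row shorter than the first one (A[i][j]).
def Pre_getCompressedSparseRowFormatFromMatrix (A : List (List Int)) : Prop :=
  A ≠ [] ∧ ∀ row ∈ A, (A.headD []).length ≤ row.length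
instance (A : List (List Int)) : Decidable (Pre_getCompressedSparseRowFormatFromMatrix A) := by
  unfold Pre_getCompressedSparseRowFormatFromMatrix; infer_instance
def pvWitness_getCompressedSparseRowFormatFromMatrix : List (List Int) := [[1, 0], [0, 2]]
def Spec_getCompressedSparseRowFormatFromMatrix (A : List (List Int)) (out : List Int × List Int × List Int) : Prop := out = getCompressedSparseRowFormatFromMatrix_alt A
instance (A : List (List Int)) (out : List Int × List Int × List Int) : Decidable (Spec_getCompressedSparseRowFormatFromMatrix A out) := by unfold Spec_getCompressedSparseRowFormatFromMatrix; infer_instance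

-- ===== CLAIM (what is proved, stated in full; the proofs are below) =====
def Claim_equal_getCompressedSparseRowFormatFromMatrix : Prop := ∀ (A : List (List Int)), Dom_getCompressedSparseRowFormatFromMatrix A → Pre_getCompressedSparseRowFormatFromMatrix A → Spec_getCompressedSparseRowFormatFromMatrix A (getCompressedSparseRowFormatFromMatrix A)

-- ===== LEMMAS AND PROOFS =====

theorem pvRowEntries_fst {A : List (List Int)} {ncols : Nat} {i : Int} :
    ∀ e ∈ pvRowEntries A ncols i, e.1 = i := by
  intro e he
  simp only [pvRowEntries, List.mem_filterMap] at he
  obtain ⟨j, _, hj⟩ := he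
  split at hj
  · cases hj; rfl
  · cases hj

theorem pvRowEntries_succ (A : List (List Int)) (n : Nat) (i : Int) :
    pvRowEntries A (n + 1) i =
      pvRowEntries A n i ++
        (if pvAij A i n ≠ 0 then [(i, (n : Int), pvAij A i n)] else []) := by
  unfold pvRowEntries
  rw [show ((n + 1 : Nat) : Int) = (n : Int) + 1 by push_cast; ring,
    PySem.List.pyRange_one_succ_right (by positivity : (0:Int) ≤ (n:Int)), List.filterMap_append]
  congr 1
  split <;> simp_all

theorem pvInnerA_char (A : List (List Int)) (i : Int) :
    ∀ (n : Nat) (AV AC AR : List Int),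
      pvInnerA A i n (AV, AC, AR, -1) =
        (AV ++ (pvRowEntries A n i).map (fun e => e.2.2),
         AC ++ (pvRowEntries A n i).map (fun e => e.2.1),
         AR,
         if pvRowEntries A n i = [] then -1 else (AV.length : Int)) := by
  intro n
  induction n with
  | zero =>
      intro AV AC AR
      simp [pvInnerA, pvRowEntries]
  | succ n ih =>
      intro AV AC AR
      unfold pvInnerA
      rw [show ((n + 1 : Nat) : Int) = (n : Int) + 1 by push_cast; ring,
        PySem.List.pyRange_one_succ_right (by positivity : (0:Int) ≤ (n:Int)), List.foldl_append]
      have h := ih AV AC AR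
      unfold pvInnerA at h
      rw [h, pvRowEntries_succ]
      by_cases hz : pvAij A i (n : Int) ≠ 0
      · by_cases he : pvRowEntries A n i = []
        · simp [pvStepInner, hz, he]
        · have hne : ¬ ((AV.length : Int) = -1) := by omega
          simp [pvStepInner, hz, he, hne]
      · simp [pvStepInner, hz]

theorem pvFoldB_same (i : Int) :
    ∀ (es : List (Int × Int × Int)), (∀ e ∈ es, e.1 = i) →
      ∀ (AR : List Int) (pos : Int),
        es.foldl pvStepB (AR, i, pos) = (AR, i, pos + es.length) := by
  intro es
  induction es with
  | nil => intro _ AR pos; simp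
  | cons e es ih =>
      intro h AR pos
      have he : e.1 = i := h e (by simp)
      simp only [List.foldl_cons, pvStepB, he]
      simp only [ne_eq, not_true_eq_false, if_false]
      rw [ih (fun x hx => h x (by simp [hx])) AR (pos + 1)]
      simp; ring

theorem pvFoldB_row (i : Int) (es : List (Int × Int × Int)) (h : ∀ e ∈ es, e.1 = i)
    (AR : List Int) (prev pos : Int) (hprev : prev ≠ i) :
    es.foldl pvStepB (AR, prev, pos) =
      if es = [] then (AR, prev, pos)
      else (AR ++ [pos], i, pos + es.length) := by
  cases es with
  | nil => simp
  | cons e es =>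
      have he : e.1 = i := h e (by simp)
      simp only [List.foldl_cons, pvStepB, he, reduceCtorEq, if_false]
      rw [if_pos (by simpa [he] using hprev.symm)]
      rw [pvFoldB_same i es (fun x hx => h x (by simp [hx])) (AR ++ [pos]) (pos + 1)]
      simp; ring

theorem pvEntries_succ (A : List (List Int)) (n ncols : Nat) :
    pvEntries A (n + 1) ncols = pvEntries A n ncols ++ pvRowEntries A ncols (n : Int) := by
  unfold pvEntries
  rw [show ((n + 1 : Nat) : Int) = (n : Int) + 1 by push_cast; ring,
    PySem.List.pyRange_one_succ_right (by positivity : (0:Int) ≤ (n:Int)), List.flatMap_append]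
  simp

theorem pvMain (A : List (List Int)) (ncols : Nat) :
    ∀ (n : Nat), ∃ (AR : List Int) (prev : Int),
      (PySem.List.pyRange 0 (n : Int) 1).foldl (pvStepOuter A ncols) ([], [], [], -1) =
        ((pvEntries A n ncols).map (fun e => e.2.2),
         (pvEntries A n ncols).map (fun e => e.2.1), AR, -1) ∧
      (pvEntries A n ncols).foldl pvStepB ([], -1, 0) =
        (AR, prev, ((pvEntries A n ncols).length : Int)) ∧
      prev < (n : Int) := by
  intro n
  induction n with
  | zero =>
      refine ⟨[], -1, ?_, ?_, by norm_num⟩ <;>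
        simp [pvEntries]
  | succ n ih =>
      obtain ⟨AR, prev, hA, hB, hlt⟩ := ih
      rw [show ((n + 1 : Nat) : Int) = (n : Int) + 1 by push_cast; ring,
        PySem.List.pyRange_one_succ_right (by positivity : (0:Int) ≤ (n:Int)), List.foldl_append, hA]
      rw [pvEntries_succ]
      have hrow := pvInnerA_char A (n : Int) ncols
        ((pvEntries A n ncols).map (fun e => e.2.2))
        ((pvEntries A n ncols).map (fun e => e.2.1)) AR
      by_cases he : pvRowEntries A ncols (n : Int) = []
      · refine ⟨AR, prev, ?_, ?_, by omega⟩
        · simp only [List.foldl_cons, List.foldl_nil]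
          unfold pvStepOuter
          rw [hrow]
          simp [he]
        · simp [he, hB]
      · refine ⟨AR ++ [((pvEntries A n ncols).length : Int)], (n : Int), ?_, ?_, by omega⟩
        · simp only [List.foldl_cons, List.foldl_nil]
          unfold pvStepOuter
          rw [hrow]
          have hne : ¬ (((pvEntries A n ncols).length : Int) = -1) := by omega
          simp [he, hne]
        · rw [List.foldl_append, hB,
            pvFoldB_row (n : Int) _ pvRowEntries_fst _ prev _ (by omega), if_neg he]
          simp

-- ===== VERDICT (by name: the statement is the Claim_ definition above) =====
theorem getCompressedSparseRowFormatFromMatrix_spec : Claim_equal_getCompressedSparseRowFormatFromMatrix := by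
  intro A _ _
  unfold Spec_getCompressedSparseRowFormatFromMatrix
  unfold getCompressedSparseRowFormatFromMatrix getCompressedSparseRowFormatFromMatrix_alt
  obtain ⟨AR, prev, hA, hB, _⟩ := pvMain A (PySem.List.pyGetD A 0 []).length A.length
  simp only [hA, hB]
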